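-- pv_equiv track=rewrite | github.com/mahdirashidi998/python-fundemental-projects | session 7/9.py | add_exept_first_even
-- ===== SOURCE A (Python) =====
-- def  add_exept_first_even(list) :
--     sum=0
--     a=0
--     for i in list :
--         if a!=1 and i%2==1 :
--             a=1
--             continue
--         sum+=i
--     return sum
-- ===== SOURCE B (Python) =====
-- def add_exept_first_even(list):
--     j = next((k for k, i in enumerate(list) if i % 2 == 1), None)
--     if j is None:
--         return sum(list)
--     total = 0
--     for k, i in enumerate(list):
--         if k != j:
--             total += i
--     return total
-- ===== Notes on version B (the rewrite author's own statement) =====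
-- stated objective: alternative
-- what changed: Replaces A's one-pass skip-flag state machine with a locate-then-aggregate pair of passes: first find the index of the first odd element, then sum every element at a different index (or the whole list if none).
import Mathlib
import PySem

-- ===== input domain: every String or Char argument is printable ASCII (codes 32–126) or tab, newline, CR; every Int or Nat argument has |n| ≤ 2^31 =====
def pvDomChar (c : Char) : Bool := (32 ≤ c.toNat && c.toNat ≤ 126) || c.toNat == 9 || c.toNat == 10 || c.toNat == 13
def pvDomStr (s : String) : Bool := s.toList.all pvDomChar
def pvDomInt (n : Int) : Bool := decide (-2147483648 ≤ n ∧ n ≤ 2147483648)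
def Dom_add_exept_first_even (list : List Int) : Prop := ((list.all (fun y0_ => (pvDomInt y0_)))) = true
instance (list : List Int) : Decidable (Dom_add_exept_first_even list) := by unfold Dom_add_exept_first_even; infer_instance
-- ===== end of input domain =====

-- B replaces A's one-pass skip-flag loop with locate-then-aggregate: find the index of the
-- first odd element, then sum every element at a different index (alternative decomposition).

-- ===== PORT A =====
-- A: one pass with flag a; skips the first i with i % 2 == 1, accumulates sum.
def add_exept_first_even (list : List Int) : Int :=
  (list.foldl
    (fun (st : Int × Int) i =>
      if st.2 ≠ 1 ∧ PySem.Int.mod i 2 = 1 then (st.1, 1) else (st.1 + i, st.2))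
    (0, 0)).1

-- ===== PORT B =====
-- next((k for k, i in enumerate(list) if i % 2 == 1), None)
def pvFirstOdd (ps : List (Int × Int)) : Option Int :=
  match ps with
  | [] => none
  | (k, i) :: rest => if PySem.Int.mod i 2 = 1 then some k else pvFirstOdd rest

def add_exept_first_even_alt (list : List Int) : Int :=
  match pvFirstOdd (PySem.List.enumerate list) with
  | none => list.foldl (· + ·) 0          -- sum(list)
  | some j =>
      (PySem.List.enumerate list).foldl
        (fun total p => if p.1 ≠ j then total + p.2 else total) 0

-- ===== PRECONDITION & SPEC =====
def Spec_add_exept_first_even (list : List Int) (out : Int) : Prop := out = add_exept_first_even_alt list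
instance (list : List Int) (out : Int) : Decidable (Spec_add_exept_first_even list out) := by unfold Spec_add_exept_first_even; infer_instance

-- ===== CLAIM (what is proved, stated in full; the proofs are below) =====
def Claim_equal_add_exept_first_even : Prop := ∀ (list : List Int), Dom_add_exept_first_even list → Spec_add_exept_first_even list (add_exept_first_even list)

-- ===== LEMMAS AND PROOFS =====

-- reference value: sum of the list with its first odd element removed
def pvSpecSum : List Int → Int
  | [] => 0
  | x :: xs => if PySem.Int.mod x 2 = 1 then xs.sum else x + pvSpecSum xs

theorem pvFoldAdd (l : List Int) (t : Int) : l.foldl (· + ·) t = t + l.sum := by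
  induction l generalizing t with
  | nil => simp
  | cons x xs ih => rw [List.foldl_cons, ih (t + x), List.sum_cons]; ring

-- A with the flag set just sums the rest
theorem pvA_flag (l : List Int) (s : Int) :
    (l.foldl (fun (st : Int × Int) i =>
      if st.2 ≠ 1 ∧ PySem.Int.mod i 2 = 1 then (st.1, 1) else (st.1 + i, st.2)) (s, 1)).1
      = s + l.sum := by
  induction l generalizing s with
  | nil => simp
  | cons x xs ih =>
    rw [List.foldl_cons,
      if_neg (fun h : ((s, (1:Int)) : Int × Int).2 ≠ 1 ∧ PySem.Int.mod x 2 = 1 => h.1 rfl),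
      ih (s + x), List.sum_cons]
    ring

theorem pvA_eq_spec (l : List Int) (s : Int) :
    (l.foldl (fun (st : Int × Int) i =>
      if st.2 ≠ 1 ∧ PySem.Int.mod i 2 = 1 then (st.1, 1) else (st.1 + i, st.2)) (s, 0)).1
      = s + pvSpecSum l := by
  induction l generalizing s with
  | nil => simp [pvSpecSum]
  | cons x xs ih =>
    by_cases hx : PySem.Int.mod x 2 = 1
    · rw [List.foldl_cons, if_pos ⟨by norm_num, hx⟩, pvA_flag]
      simp only [pvSpecSum]
      rw [if_pos hx]
    · rw [List.foldl_cons, if_neg (fun h => hx h.2), ih (s + x)]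
      simp only [pvSpecSum]
      rw [if_neg hx]
      ring

theorem pvFirstOdd_ge (l : List Int) (s j : Int)
    (h : pvFirstOdd (PySem.List.enumerate l s) = some j) : s ≤ j := by
  induction l generalizing s with
  | nil => simp [PySem.List.enumerate_nil, pvFirstOdd] at h
  | cons x xs ih =>
    rw [PySem.List.enumerate_cons] at h
    simp only [pvFirstOdd] at h
    split at h
    · injection h with h'; omega
    · have := ih (s + 1) h; omega

theorem pvFirstOdd_none (l : List Int) (s : Int)
    (h : pvFirstOdd (PySem.List.enumerate l s) = none) : pvSpecSum l = l.sum := by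
  induction l generalizing s with
  | nil => simp [pvSpecSum]
  | cons x xs ih =>
    rw [PySem.List.enumerate_cons] at h
    simp only [pvFirstOdd] at h
    split at h
    · exact absurd h (by simp)
    · next hx =>
      simp only [pvSpecSum]
      rw [if_neg hx, ih (s + 1) h, List.sum_cons]

-- generic accumulator shift for the skip fold
theorem pvSkip_acc (ps : List (Int × Int)) (j t : Int) :
    ps.foldl (fun total p => if p.1 ≠ j then total + p.2 else total) t
      = t + ps.foldl (fun total p => if p.1 ≠ j then total + p.2 else total) 0 := by
  induction ps generalizing t with
  | nil => simp
  | cons p ps ih =>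
    by_cases h : p.1 ≠ j
    · simp only [List.foldl_cons, if_pos h]
      rw [ih (t + p.2), ih (0 + p.2)]; ring
    · simp only [List.foldl_cons, if_neg h]
      exact ih t

-- if j is below every index, the skip fold sums everything
theorem pvSkip_all (l : List Int) (s j : Int) (hj : j < s) :
    (PySem.List.enumerate l s).foldl
      (fun total p => if p.1 ≠ j then total + p.2 else total) 0 = l.sum := by
  induction l generalizing s with
  | nil => simp [PySem.List.enumerate_nil]
  | cons x xs ih =>
    rw [PySem.List.enumerate_cons, List.foldl_cons,
      if_pos (show ((s, x) : Int × Int).1 ≠ j from by omega),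
      pvSkip_acc, ih (s + 1) (by omega), List.sum_cons]
    ring

-- B, started at any index offset, computes pvSpecSum
theorem pvB_eq_spec (l : List Int) (s : Int) :
    (match pvFirstOdd (PySem.List.enumerate l s) with
     | none => l.foldl (· + ·) 0
     | some j =>
        (PySem.List.enumerate l s).foldl
          (fun total p => if p.1 ≠ j then total + p.2 else total) 0)
      = pvSpecSum l := by
  induction l generalizing s with
  | nil => simp [PySem.List.enumerate_nil, pvFirstOdd, pvSpecSum]
  | cons x xs ih =>
    rw [PySem.List.enumerate_cons]
    simp only [pvFirstOdd]
    by_cases hx : PySem.Int.mod x 2 = 1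
    · rw [if_pos hx]
      show (((s, x) :: PySem.List.enumerate xs (s + 1)).foldl
        (fun total p => if p.1 ≠ s then total + p.2 else total) 0) = pvSpecSum (x :: xs)
      rw [List.foldl_cons, if_neg (fun h : ((s, x) : Int × Int).1 ≠ s => h rfl),
        pvSkip_all xs (s + 1) s (by omega)]
      simp only [pvSpecSum]
      rw [if_pos hx]
    · rw [if_neg hx]
      cases h : pvFirstOdd (PySem.List.enumerate xs (s + 1)) with
      | none =>
        show (x :: xs).foldl (· + ·) 0 = pvSpecSum (x :: xs)
        rw [pvFoldAdd, List.sum_cons]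
        simp only [pvSpecSum]
        rw [if_neg hx, pvFirstOdd_none xs (s + 1) h]
        ring
      | some j =>
        have hj : s + 1 ≤ j := pvFirstOdd_ge xs (s + 1) j h
        have hB : (PySem.List.enumerate xs (s + 1)).foldl
            (fun total p => if p.1 ≠ j then total + p.2 else total) 0 = pvSpecSum xs := by
          have := ih (s + 1); rw [h] at this; exact this
        show (((s, x) :: PySem.List.enumerate xs (s + 1)).foldl
          (fun total p => if p.1 ≠ j then total + p.2 else total) 0) = pvSpecSum (x :: xs)
        rw [List.foldl_cons, if_pos (show ((s, x) : Int × Int).1 ≠ j from by omega),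
          pvSkip_acc, hB]
        simp only [pvSpecSum]
        rw [if_neg hx]
        ring

-- ===== VERDICT (by name: the statement is the Claim_ definition above) =====
theorem add_exept_first_even_spec : Claim_equal_add_exept_first_even := by
  intro l _
  unfold Spec_add_exept_first_even add_exept_first_even add_exept_first_even_alt
  rw [pvA_eq_spec l 0]
  have hB := pvB_eq_spec l 0
  rw [show PySem.List.enumerate l = PySem.List.enumerate l 0 from rfl, hB]
  ring
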